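-- pv_equiv track=rewrite | github.com/Arklight2/Lab1 | Z1/Z1.py | gcd_of_max_odd_composite_divisor_and_digit_product
-- ===== SOURCE A (Python) =====
-- import math
--
-- def product_of_digits_not_divisible_by_5(n):
--     product = 1
--     has_valid_digit = False
--
--     for digit in str(abs(n)):
--         digit = int(digit)
--         if digit % 5 != 0:
--             product *= digit
--             has_valid_digit = True
--
--     return product if has_valid_digit else 0
--
-- def gcd_of_max_odd_composite_divisor_and_digit_product(n):
--     def is_prime(x):
--         if x < 2:
--             return False
--         for i in range(2, int(math.sqrt(x)) + 1):
--             if x % i == 0: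
--                 return False
--         return True
--
--     max_odd_composite = -1
--     for i in range(3, n + 1, 2):
--         if n % i == 0 and not is_prime(i):
--             max_odd_composite = i
--
--     if max_odd_composite == -1:
--         return None
--
--     digit_product = product_of_digits_not_divisible_by_5(n)
--     return math.gcd(max_odd_composite, digit_product)
-- ===== SOURCE B (Python) =====
-- import math
--
-- def product_of_digits_not_divisible_by_5(n):
--     product = 1
--     has_valid_digit = False
--
--     for digit in str(abs(n)):
--         digit = int(digit)
--         if digit % 5 != 0:
--             product *= digit
--             has_valid_digit = True
--
--     return product if has_valid_digit else 0
--
-- def _is_prime_odd(m):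
--     # m is odd and >= 3: trial division by odd candidates only
--     return all(m % i for i in range(3, math.isqrt(m) + 1, 2))
--
-- def gcd_of_max_odd_composite_divisor_and_digit_product(n):
--     # any odd composite divisor is at least 9
--     if n < 9:
--         return None
--     # strip factors of 2: m is the largest odd divisor of n
--     m = n
--     while m % 2 == 0:
--         m //= 2
--     # the largest odd composite divisor exists iff m itself is composite (and is m)
--     if m == 1 or _is_prime_odd(m):
--         return None
--     return math.gcd(m, product_of_digits_not_divisible_by_5(n))
-- ===== Notes on version B (the rewrite author's own statement) =====
-- stated objective: faster
-- what changed: Instead of scanning every odd candidate 3..n and trial-dividing each for primality, B strips the factors of 2 from n to get its odd part m, which is the largest odd composite divisor exactly when m itself is composite, checked by a single odd-only trial division up to isqrt(m).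
import Mathlib
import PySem

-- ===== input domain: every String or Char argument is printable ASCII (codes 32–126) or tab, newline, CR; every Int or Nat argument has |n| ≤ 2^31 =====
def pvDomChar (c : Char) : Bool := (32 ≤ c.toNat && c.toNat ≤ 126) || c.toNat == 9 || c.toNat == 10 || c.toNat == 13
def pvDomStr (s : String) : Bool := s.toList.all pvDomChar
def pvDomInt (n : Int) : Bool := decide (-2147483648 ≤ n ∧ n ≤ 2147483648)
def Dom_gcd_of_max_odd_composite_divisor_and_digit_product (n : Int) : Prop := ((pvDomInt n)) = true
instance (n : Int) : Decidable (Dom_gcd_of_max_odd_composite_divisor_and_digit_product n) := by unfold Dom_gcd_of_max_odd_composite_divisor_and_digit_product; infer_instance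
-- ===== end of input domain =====

-- B replaces A's O(n·√n) scan over all odd candidates by stripping the factors of 2 off n
-- (the odd part is the largest odd composite divisor exactly when it is composite): faster (asymptotic).

-- ===== PORT A =====
-- shared module-level helper (identical in Source A and Source B): product_of_digits_not_divisible_by_5
-- int(digit) on a single char of str(abs(n)) never raises, so .getD 0 is exact here.
def product_of_digits_not_divisible_by_5 (n : Int) : Int :=
  let r := (PySem.Int.toChars ((n.natAbs : Int))).foldl
    (fun (st : Int × Bool) c =>
      let digit : Int := (PySem.Int.ofChars? [c]).getD 0
      if PySem.Int.mod digit 5 == 0 then st else (st.1 * digit, true))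
    (1, false)
  if r.2 then r.1 else 0

-- A's inner is_prime: trial division over range(2, int(math.sqrt(x)) + 1);
-- int(math.sqrt(x)) = Nat.sqrt x.toNat exactly for the 0 ≤ x ≤ 2^31 values it is called on.
def pyIsPrime_A (x : Int) : Bool :=
  if x < 2 then false
  else (PySem.List.pyRange 2 ((Nat.sqrt x.toNat : Int) + 1) 1).all
    (fun i => !(PySem.Int.mod x i == 0))

def gcd_of_max_odd_composite_divisor_and_digit_product (n : Int) : Option Int :=
  let moc := (PySem.List.pyRange 3 (n + 1) 2).foldl
    (fun acc i => if PySem.Int.mod n i == 0 && !(pyIsPrime_A i) then i else acc) (-1)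
  if moc == -1 then none
  else some ((Int.gcd moc (product_of_digits_not_divisible_by_5 n) : Int))

-- ===== PORT B =====
-- while m % 2 == 0: m //= 2   (the '1 ≤ m' conjunct is a termination guard only:
-- B reaches this loop with n ≥ 9, so every value taken by m is ≥ 1 and the guard never fires)
def stripTwos_B (m : Int) : Int :=
  if _h : PySem.Int.mod m 2 == 0 ∧ 1 ≤ m then stripTwos_B (PySem.Int.floordiv m 2) else m
termination_by m.toNat
decreasing_by
  obtain ⟨h1, h2⟩ := _h
  rw [beq_iff_eq, PySem.Int.mod_eq_emod_of_pos (by norm_num)] at h1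
  rw [PySem.Int.floordiv_eq_ediv_of_pos (by norm_num)]
  omega

-- all(m % i for i in range(3, math.isqrt(m) + 1, 2)); math.isqrt = Nat.sqrt (exact)
def pyIsPrimeOdd_B (m : Int) : Bool :=
  (PySem.List.pyRange 3 ((Nat.sqrt m.toNat : Int) + 1) 2).all
    (fun i => !(PySem.Int.mod m i == 0))

def gcd_of_max_odd_composite_divisor_and_digit_product_alt (n : Int) : Option Int :=
  if n < 9 then none
  else
    let m := stripTwos_B n
    if m == 1 || pyIsPrimeOdd_B m then none
    else some ((Int.gcd m (product_of_digits_not_divisible_by_5 n) : Int))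

-- ===== PRECONDITION & SPEC =====
def Spec_gcd_of_max_odd_composite_divisor_and_digit_product (n : Int) (out : Option Int) : Prop := out = gcd_of_max_odd_composite_divisor_and_digit_product_alt n
instance (n : Int) (out : Option Int) : Decidable (Spec_gcd_of_max_odd_composite_divisor_and_digit_product n out) := by unfold Spec_gcd_of_max_odd_composite_divisor_and_digit_product; infer_instance

-- ===== CLAIM (what is proved, stated in full; the proofs are below) =====
def Claim_equal_gcd_of_max_odd_composite_divisor_and_digit_product : Prop := ∀ (n : Int), Dom_gcd_of_max_odd_composite_divisor_and_digit_product n → Spec_gcd_of_max_odd_composite_divisor_and_digit_product n (gcd_of_max_odd_composite_divisor_and_digit_product n)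

-- ===== LEMMAS AND PROOFS =====

-- the last-match fold returns its init when nothing matches
lemma foldl_if_none {p : Int → Bool} (l : List Int) (a0 : Int)
    (h : ∀ i ∈ l, p i = false) :
    l.foldl (fun acc i => if p i then i else acc) a0 = a0 := by
  induction l generalizing a0 with
  | nil => rfl
  | cons x t ih =>
    simp only [List.foldl_cons, h x (by simp)]
    exact ih a0 (fun i hi => h i (by simp [hi]))

-- on a strictly increasing list the last-match fold returns the largest match
lemma foldl_if_max {p : Int → Bool} (l : List Int) (hl : l.Pairwise (· < ·))
    (m : Int) (hm : m ∈ l) (hpm : p m = true)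
    (hmax : ∀ i ∈ l, p i = true → i ≤ m) (a0 : Int) :
    l.foldl (fun acc i => if p i then i else acc) a0 = m := by
  induction l generalizing a0 with
  | nil => cases hm
  | cons x t ih =>
    rw [List.pairwise_cons] at hl
    rcases List.mem_cons.1 hm with rfl | hmt
    · simp only [List.foldl_cons, hpm, if_true]
      exact foldl_if_none t m (fun i hi => by
        by_contra hne
        have := hmax i (by simp [hi]) (by simpa using hne)
        exact absurd (hl.1 i hi) (by omega))
    · simp only [List.foldl_cons]
      exact ih hl.2 hmt (fun i hi hp => hmax i (by simp [hi]) hp) _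

-- membership in the step-2 range
lemma mem_range2 (a b x : Int) : x ∈ PySem.List.pyRange a b 2 ↔ a ≤ x ∧ x < b ∧ 2 ∣ x - a :=
  PySem.List.mem_pyRange_iff_of_pos (by norm_num) x

lemma pairwise_range2 (a b : Int) : (PySem.List.pyRange a b 2).Pairwise (· < ·) := by
  rw [PySem.List.pyRange_of_pos a b (by norm_num : (0:Int) < 2)]
  exact List.pairwise_lt_range.map _ (fun k l h => by omega)

-- A's trial division is primality (of x.toNat), for 2 ≤ x
lemma isPrimeA_iff (x : Int) (hx : 2 ≤ x) : pyIsPrime_A x = true ↔ Nat.Prime x.toNat := by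
  have hx0 : (x.toNat : Int) = x := Int.toNat_of_nonneg (by omega)
  rw [pyIsPrime_A, if_neg (by omega)]
  simp only [List.all_eq_true, PySem.List.mem_pyRange_one, Bool.not_eq_true',
    beq_eq_false_iff_ne, ne_eq]
  constructor
  · intro h
    rw [Nat.prime_def_le_sqrt]
    refine ⟨by omega, fun mm h2 hs hd => ?_⟩
    refine h (mm : Int) ⟨by exact_mod_cast h2, by omega⟩ ?_
    rw [PySem.Int.mod_eq_zero_iff_dvd]
    rw [← hx0]; exact_mod_cast hd
  · intro hp i ⟨hi2, hi⟩ hmod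
    rw [PySem.Int.mod_eq_zero_iff_dvd] at hmod
    have hiN : (i.toNat : Int) = i := Int.toNat_of_nonneg (by omega)
    have : i.toNat ∣ x.toNat := by
      rw [← Int.natCast_dvd_natCast, hiN, hx0]; exact hmod
    exact (Nat.prime_def_le_sqrt.1 hp).2 i.toNat (by omega) (by omega) this

-- B's odd-only trial division is primality for odd m ≥ 3
lemma isPrimeOddB_iff (m : Int) (h3 : 3 ≤ m) (hodd : ¬ (2:Int) ∣ m) :
    pyIsPrimeOdd_B m = true ↔ Nat.Prime m.toNat := by
  have hm0 : (m.toNat : Int) = m := Int.toNat_of_nonneg (by omega)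
  rw [pyIsPrimeOdd_B]
  simp only [List.all_eq_true, Bool.not_eq_true', beq_eq_false_iff_ne, ne_eq]
  constructor
  · intro h
    by_contra hnp
    set p := m.toNat.minFac with hp
    have hpp : Nat.Prime p := Nat.minFac_prime (by omega)
    have hpd : p ∣ m.toNat := Nat.minFac_dvd _
    have hps : p * p ≤ m.toNat := by
      have := Nat.minFac_sq_le_self (n := m.toNat) (by omega) hnp
      nlinarith [this, sq p]
    have hp2 : p ≠ 2 := by
      intro h2
      exact hodd (by rw [← hm0]; exact_mod_cast (h2 ▸ hpd))
    have hpodd : ¬ (2 ∣ p) := fun hd => hp2 ((Nat.prime_dvd_prime_iff_eq Nat.prime_two hpp).1 hd).symm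
    have hp3 : 3 ≤ p := by
      have := hpp.two_le; omega
    have hple : p ≤ Nat.sqrt m.toNat := Nat.le_sqrt.2 hps
    refine h (p : Int) ((mem_range2 _ _ _).2 ⟨by exact_mod_cast hp3, by omega, by omega⟩) ?_
    rw [PySem.Int.mod_eq_zero_iff_dvd, ← hm0]
    exact_mod_cast hpd
  · intro hp i hi hmod
    obtain ⟨hi3, hilt, _⟩ := (mem_range2 _ _ _).1 hi
    rw [PySem.Int.mod_eq_zero_iff_dvd] at hmod
    have hiN : (i.toNat : Int) = i := Int.toNat_of_nonneg (by omega)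
    have hdN : i.toNat ∣ m.toNat := by
      rw [← Int.natCast_dvd_natCast, hiN, hm0]; exact hmod
    have hlt : Nat.sqrt m.toNat < m.toNat := Nat.sqrt_lt_self (by omega)
    rcases (Nat.prime_def.1 hp).2 i.toNat hdN with h1 | h1 <;> omega

-- the stripped value is the odd part: odd, ≥ 1, divides m, and every odd divisor of m divides it
lemma strip_spec (m : Int) (hm : 1 ≤ m) :
    1 ≤ stripTwos_B m ∧ ¬ (2:Int) ∣ stripTwos_B m ∧ stripTwos_B m ∣ m ∧
    ∀ d : Int, ¬ (2:Int) ∣ d → d ∣ m → d ∣ stripTwos_B m := by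
  generalize hN : m.toNat = N
  induction N using Nat.strong_induction_on generalizing m with
  | _ N ih =>
    rw [stripTwos_B]
    split_ifs with h
    · obtain ⟨h1, h2⟩ := h
      rw [beq_iff_eq, PySem.Int.mod_eq_emod_of_pos (by norm_num)] at h1
      rw [PySem.Int.floordiv_eq_ediv_of_pos (by norm_num)]
      have hm2 : m = 2 * (m / 2) := by omega
      have h1m' : 1 ≤ m / 2 := by omega
      obtain ⟨a, b, c, d⟩ := ih (m / 2).toNat (by omega) (m / 2) h1m' rfl
      refine ⟨a, b, c.trans ⟨2, by omega⟩, fun e he hed => ?_⟩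
      refine d e he ?_
      have h2e : IsCoprime (2:Int) e := (Int.prime_two.coprime_iff_not_dvd).mpr he
      exact h2e.symm.dvd_of_dvd_mul_left (hm2 ▸ hed)
    · have hodd : ¬ (2:Int) ∣ m := by
        intro hd
        exact h ⟨by rw [beq_iff_eq, PySem.Int.mod_eq_emod_of_pos (by norm_num)]; omega, hm⟩
      exact ⟨hm, hodd, dvd_refl m, fun d _ hd => hd⟩

-- assembly for n ≥ 9: both sides reduce through the odd part m = stripTwos_B n
lemma main_large (n : Int) (hn : 9 ≤ n) :
    gcd_of_max_odd_composite_divisor_and_digit_product n = gcd_of_max_odd_composite_divisor_and_digit_product_alt n := by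
  obtain ⟨hm1, hmodd, hmdvd, hmmax⟩ := strip_spec n (by omega)
  set m := stripTwos_B n with hmdef
  have hmn : m ≤ n := Int.le_of_dvd (by omega) hmdvd
  have hm13 : m = 1 ∨ 3 ≤ m := by omega
  have hB : gcd_of_max_odd_composite_divisor_and_digit_product_alt n =
      (if m == 1 || pyIsPrimeOdd_B m then none
       else some ((Int.gcd m (product_of_digits_not_divisible_by_5 n) : Int))) := by
    unfold gcd_of_max_odd_composite_divisor_and_digit_product_alt
    rw [if_neg (by omega : ¬ (n < 9)), ← hmdef]
  by_cases hcomp : 3 ≤ m ∧ ¬ Nat.Prime m.toNat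
  · obtain ⟨hm3, hnp⟩ := hcomp
    have hfold : (PySem.List.pyRange 3 (n + 1) 2).foldl
        (fun acc i => if PySem.Int.mod n i == 0 && !(pyIsPrime_A i) then i else acc) (-1) = m := by
      apply foldl_if_max _ (pairwise_range2 _ _) m
      · exact (mem_range2 _ _ _).2 ⟨hm3, by omega, by omega⟩
      · simp only [Bool.and_eq_true, beq_iff_eq, Bool.not_eq_true', PySem.Int.mod_eq_zero_iff_dvd]
        refine ⟨hmdvd, ?_⟩
        rw [← Bool.not_eq_true, isPrimeA_iff m (by omega)]
        exact hnp
      · intro i hi hp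
        obtain ⟨hi3, hilt, hiodd⟩ := (mem_range2 _ _ _).1 hi
        simp only [Bool.and_eq_true, beq_iff_eq, Bool.not_eq_true',
          PySem.Int.mod_eq_zero_iff_dvd] at hp
        exact Int.le_of_dvd (by omega) (hmmax i (by omega) hp.1)
    have hA : gcd_of_max_odd_composite_divisor_and_digit_product n =
        some ((Int.gcd m (product_of_digits_not_divisible_by_5 n) : Int)) := by
      unfold gcd_of_max_odd_composite_divisor_and_digit_product
      rw [hfold, if_neg (by simp only [beq_iff_eq]; omega)]
    rw [hA, hB, if_neg]
    simp only [Bool.or_eq_true, beq_iff_eq, not_or]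
    exact ⟨by omega, by rw [isPrimeOddB_iff m hm3 hmodd]; exact hnp⟩
  · have hfold : (PySem.List.pyRange 3 (n + 1) 2).foldl
        (fun acc i => if PySem.Int.mod n i == 0 && !(pyIsPrime_A i) then i else acc) (-1) = -1 := by
      apply foldl_if_none
      intro i hi
      obtain ⟨hi3, hilt, hiodd⟩ := (mem_range2 _ _ _).1 hi
      by_contra hne
      have hp : (PySem.Int.mod n i == 0 && !(pyIsPrime_A i)) = true := by
        simpa using hne
      simp only [Bool.and_eq_true, beq_iff_eq, Bool.not_eq_true',
        PySem.Int.mod_eq_zero_iff_dvd] at hp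
      have hidvdm : i ∣ m := hmmax i (by omega) hp.1
      have hiprime : ¬ Nat.Prime i.toNat := by
        rw [← isPrimeA_iff i (by omega)]
        simp [hp.2]
      rcases hm13 with h1 | h3
      · have := Int.le_of_dvd (by omega) (h1 ▸ hidvdm)
        omega
      · have hprime : Nat.Prime m.toNat := by
          rcases not_and_or.1 hcomp with h | h
          · omega
          · exact not_not.1 h
        have hdN : i.toNat ∣ m.toNat := by
          have hiN : (i.toNat : Int) = i := Int.toNat_of_nonneg (by omega)
          have hmN : (m.toNat : Int) = m := Int.toNat_of_nonneg (by omega)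
          rw [← Int.natCast_dvd_natCast, hiN, hmN]; exact hidvdm
        rcases (Nat.prime_def.1 hprime).2 i.toNat hdN with h1 | h1
        · omega
        · exact hiprime (by rwa [h1])
    have hA : gcd_of_max_odd_composite_divisor_and_digit_product n = none := by
      unfold gcd_of_max_odd_composite_divisor_and_digit_product
      rw [hfold, if_pos (by simp)]
    rw [hA, hB, if_pos]
    rcases hm13 with h1 | h3
    · simp [h1]
    · have hprime : Nat.Prime m.toNat := by
        rcases not_and_or.1 hcomp with h | h
        · omega
        · exact not_not.1 h
      simp only [Bool.or_eq_true]
      exact Or.inr ((isPrimeOddB_iff m h3 hmodd).2 hprime)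

-- ===== VERDICT (by name: the statement is the Claim_ definition above) =====
theorem gcd_of_max_odd_composite_divisor_and_digit_product_spec : Claim_equal_gcd_of_max_odd_composite_divisor_and_digit_product := by
  intro n _
  show gcd_of_max_odd_composite_divisor_and_digit_product n = gcd_of_max_odd_composite_divisor_and_digit_product_alt n
  by_cases hn9 : n < 9
  · have hB : gcd_of_max_odd_composite_divisor_and_digit_product_alt n = none := by
      unfold gcd_of_max_odd_composite_divisor_and_digit_product_alt
      rw [if_pos hn9]
    rw [hB]
    have hfold : (PySem.List.pyRange 3 (n + 1) 2).foldl
        (fun acc i => if PySem.Int.mod n i == 0 && !(pyIsPrime_A i) then i else acc) (-1) = -1 := by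
      apply foldl_if_none
      intro i hi
      obtain ⟨hi3, hilt, hiodd⟩ := (mem_range2 _ _ _).1 hi
      have hi357 : i = 3 ∨ i = 5 ∨ i = 7 := by omega
      have hpr : Nat.Prime i.toNat := by rcases hi357 with rfl | rfl | rfl <;> decide
      have hpt : pyIsPrime_A i = true := (isPrimeA_iff i (by omega)).2 hpr
      simp [hpt]
    unfold gcd_of_max_odd_composite_divisor_and_digit_product
    rw [hfold, if_pos (by decide)]
  · exact main_large n (by omega)
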